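-- pv_equiv track=rewrite | github.com/Python3pkg/PyGuitarPro | guitarpro/gpx.py | _encodebits
-- ===== SOURCE A (Python) =====
-- def _encodebits(bits, reversed_=False):
--     length = len(bits)
--     result = 0
--     for index, bit in enumerate(bits):
--         if bit is None:
--             continue
--         exp = (length - index - 1) if not reversed_ else index
--         result |= bit << exp
--     return result
-- ===== SOURCE B (Python) =====
-- def _encodebits(bits, reversed_=False):
--     result = 0
--     for bit in (reversed(bits) if reversed_ else bits):
--         result <<= 1
--         if bit is not None:
--             result |= bit
--     return result
-- ===== Notes on version B (the rewrite author's own statement) =====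
-- stated objective: simpler
-- what changed: Replaces the enumerate/length/per-bit exponent computation by a Horner-style shift-accumulate loop (shift the accumulator by one, OR the bit into the low end), iterating in reverse when reversed_ is set; this also avoids building a fresh exp-bit shifted big integer for every element.
import Mathlib
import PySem

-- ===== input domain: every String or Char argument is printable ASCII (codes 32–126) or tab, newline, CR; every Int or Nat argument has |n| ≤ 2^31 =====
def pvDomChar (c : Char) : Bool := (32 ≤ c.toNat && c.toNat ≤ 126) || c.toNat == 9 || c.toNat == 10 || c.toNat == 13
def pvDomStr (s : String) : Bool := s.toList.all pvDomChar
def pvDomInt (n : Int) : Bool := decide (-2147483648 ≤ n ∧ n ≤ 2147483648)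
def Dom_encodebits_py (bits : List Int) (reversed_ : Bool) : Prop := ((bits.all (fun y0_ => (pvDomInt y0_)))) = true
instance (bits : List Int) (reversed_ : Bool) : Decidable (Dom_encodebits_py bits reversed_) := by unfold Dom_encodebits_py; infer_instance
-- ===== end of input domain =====

-- B replaces the enumerate/length/exponent computation by a Horner shift-accumulate loop (simpler).
-- Under the List Int typing no element is None, so Python's 'is None' tests are vacuous in both ports.

-- ===== PORT A =====
-- exp = (length - index - 1) if not reversed_ else index; always ≥ 0 since index < length, so .toNat is exact
def encodebits_py (bits : List Int) (reversed_ : Bool) : Int :=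
  let length : Int := (bits.length : Int)
  (PySem.List.enumerate bits).foldl
    (fun (result : Int) (p : Int × Int) =>
      let exp : Int := if !reversed_ then length - p.1 - 1 else p.1
      PySem.Int.bor result (p.2 <<< exp.toNat)) 0

-- ===== PORT B =====
def encodebits_py_alt (bits : List Int) (reversed_ : Bool) : Int :=
  (if reversed_ then bits.reverse else bits).foldl
    (fun result bit => PySem.Int.bor (result <<< (1 : Nat)) bit) 0

-- ===== PRECONDITION & SPEC =====
def Spec_encodebits_py (bits : List Int) (reversed_ : Bool) (out : Int) : Prop := out = encodebits_py_alt bits reversed_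
instance (bits : List Int) (reversed_ : Bool) (out : Int) : Decidable (Spec_encodebits_py bits reversed_ out) := by unfold Spec_encodebits_py; infer_instance

-- ===== CLAIM (what is proved, stated in full; the proofs are below) =====
def Claim_equal_encodebits_py : Prop := ∀ (bits : List Int) (reversed_ : Bool), Dom_encodebits_py bits reversed_ → Spec_encodebits_py bits reversed_ (encodebits_py bits reversed_)

-- ===== LEMMAS AND PROOFS =====
-- concrete bit-composition lemmas
theorem pv_two_mul_lor (m n : Nat) : (2*m) ||| (2*n) = 2*(m ||| n) := by
  apply Nat.eq_of_testBit_eq; intro k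
  rw [Nat.testBit_lor]
  cases k with
  | zero => simp [Nat.testBit_zero, Nat.mul_mod_right]
  | succ k => rw [Nat.testBit_succ, Nat.testBit_succ, Nat.testBit_succ,
      Nat.mul_div_cancel_left _ (by norm_num : 0 < 2), Nat.mul_div_cancel_left _ (by norm_num : 0 < 2),
      Nat.mul_div_cancel_left _ (by norm_num : 0 < 2), Nat.testBit_lor]
theorem pv_land_odd_odd (m n : Nat) : (2*m+1) &&& (2*n+1) = 2*(m &&& n)+1 := by
  apply Nat.eq_of_testBit_eq; intro k
  rw [Nat.testBit_and]
  cases k with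
  | zero => simp only [Nat.testBit_zero]; rw [(by omega : (2*m+1) % 2 = 1), (by omega : (2*n+1) % 2 = 1), (by omega : (2*(m&&&n)+1) % 2 = 1)]; decide
  | succ k => rw [Nat.testBit_succ, Nat.testBit_succ, Nat.testBit_succ,
      (by omega : (2*m+1)/2 = m), (by omega : (2*n+1)/2 = n), (by omega : (2*(m&&&n)+1)/2 = m&&&n), Nat.testBit_and]
theorem pv_ldiff_odd_even (m n : Nat) : Nat.ldiff (2*m+1) (2*n) = 2*(Nat.ldiff m n)+1 := by
  apply Nat.eq_of_testBit_eq; intro k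
  rw [Nat.testBit_ldiff]
  cases k with
  | zero => simp only [Nat.testBit_zero]; rw [(by omega : (2*m+1) % 2 = 1), (by omega : (2*n) % 2 = 0), (by omega : (2*(Nat.ldiff m n)+1) % 2 = 1)]; decide
  | succ k => rw [Nat.testBit_succ, Nat.testBit_succ, Nat.testBit_succ,
      (by omega : (2*m+1)/2 = m), (by omega : (2*n)/2 = n), (by omega : (2*(Nat.ldiff m n)+1)/2 = Nat.ldiff m n), Nat.testBit_ldiff]
theorem pv_ldiff_div_two (m n : Nat) : (Nat.ldiff m n)/2 = Nat.ldiff (m/2) (n/2) := by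
  apply Nat.eq_of_testBit_eq; intro k
  rw [Nat.testBit_div_two, Nat.testBit_ldiff, Nat.testBit_ldiff, Nat.testBit_div_two, Nat.testBit_div_two]
theorem pv_land_add_ldiff (m n : Nat) : (m &&& n) + Nat.ldiff m n = m := by
  induction m using Nat.strong_induction_on generalizing n with
  | _ m IH =>
    rcases Nat.eq_zero_or_pos m with hm | hm
    · subst hm
      have h1 : (0 &&& n) = 0 := Nat.zero_and n
      have h2 : Nat.ldiff 0 n = 0 := by
        apply Nat.eq_of_testBit_eq; intro k; simp [Nat.testBit_ldiff]
      omega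
    · have IH2 := IH (m/2) (by omega) (n/2)
      have ha : (m &&& n)/2 = (m/2) &&& (n/2) := Nat.and_div_two
      have hl : (Nat.ldiff m n)/2 = Nat.ldiff (m/2) (n/2) := pv_ldiff_div_two m n
      have ta : (m &&& n).testBit 0 = (m.testBit 0 && n.testBit 0) := Nat.testBit_and ..
      have tl : (Nat.ldiff m n).testBit 0 = (m.testBit 0 && !(n.testBit 0)) := Nat.testBit_ldiff ..
      have u1 := Nat.toNat_testBit (m &&& n) 0
      have u2 := Nat.toNat_testBit (Nat.ldiff m n) 0
      have u3 := Nat.toNat_testBit m 0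
      rw [ta] at u1; rw [tl] at u2
      cases hb1 : m.testBit 0 <;> cases hb2 : n.testBit 0 <;>
        simp [hb1, hb2] at u1 u2 u3 <;> omega
theorem pv_sub_land (m n : Nat) : m - (m &&& n) = Nat.ldiff m n := by
  have := pv_land_add_ldiff m n; omega
-- pure testBit identities used by assoc
theorem pv_ldiff_ldiff_left (c b a : Nat) : Nat.ldiff (Nat.ldiff c b) a = Nat.ldiff c (a ||| b) := by
  apply Nat.eq_of_testBit_eq; intro k
  simp only [Nat.testBit_ldiff, Nat.testBit_lor]
  cases c.testBit k <;> cases b.testBit k <;> cases a.testBit k <;> rfl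
theorem pv_ldiff_right_comm (b a c : Nat) : Nat.ldiff (Nat.ldiff b a) c = Nat.ldiff (Nat.ldiff b c) a := by
  apply Nat.eq_of_testBit_eq; intro k
  simp only [Nat.testBit_ldiff]
  cases b.testBit k <;> cases a.testBit k <;> cases c.testBit k <;> rfl
theorem pv_ldiff_land_left (b a c : Nat) : (Nat.ldiff b a) &&& c = Nat.ldiff (b &&& c) a := by
  apply Nat.eq_of_testBit_eq; intro k
  simp only [Nat.testBit_ldiff, Nat.testBit_and]
  cases b.testBit k <;> cases a.testBit k <;> cases c.testBit k <;> rfl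
theorem pv_land_ldiff (a b c : Nat) : a &&& Nat.ldiff b c = Nat.ldiff (a &&& b) c := by
  apply Nat.eq_of_testBit_eq; intro k
  simp only [Nat.testBit_ldiff, Nat.testBit_and]
  cases a.testBit k <;> cases b.testBit k <;> cases c.testBit k <;> rfl
def pvBor (a b : Int) : Int :=
  if 0 ≤ a then
    if 0 ≤ b then ((a.toNat ||| b.toNat : Nat) : Int)
    else -((Nat.ldiff (-b-1).toNat a.toNat : Nat) : Int) - 1
  else
    if 0 ≤ b then -((Nat.ldiff (-a-1).toNat b.toNat : Nat) : Int) - 1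
    else -(((-a-1).toNat &&& (-b-1).toNat : Nat) : Int) - 1

theorem pv_bor_eq (a b : Int) : PySem.Int.bor a b = pvBor a b := by
  unfold PySem.Int.bor pvBor
  split_ifs <;> first | rfl | rw [pv_sub_land]
-- branch lemmas
theorem pvBor_pp {a b : Int} (ha : 0 ≤ a) (hb : 0 ≤ b) : pvBor a b = ((a.toNat ||| b.toNat : Nat) : Int) := by
  simp [pvBor, ha, hb]
theorem pvBor_pn {a b : Int} (ha : 0 ≤ a) (hb : ¬ 0 ≤ b) : pvBor a b = -((Nat.ldiff (-b-1).toNat a.toNat : Nat) : Int) - 1 := by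
  simp [pvBor, ha, hb]
theorem pvBor_np {a b : Int} (ha : ¬ 0 ≤ a) (hb : 0 ≤ b) : pvBor a b = -((Nat.ldiff (-a-1).toNat b.toNat : Nat) : Int) - 1 := by
  simp [pvBor, ha, hb]
theorem pvBor_nn {a b : Int} (ha : ¬ 0 ≤ a) (hb : ¬ 0 ≤ b) : pvBor a b = -(((-a-1).toNat &&& (-b-1).toNat : Nat) : Int) - 1 := by
  simp [pvBor, ha, hb]
theorem pv_bor_comm (a b : Int) : pvBor a b = pvBor b a := by
  by_cases ha : 0 ≤ a <;> by_cases hb : 0 ≤ b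
  · rw [pvBor_pp ha hb, pvBor_pp hb ha, Nat.or_comm]
  · rw [pvBor_pn ha hb, pvBor_np hb ha]
  · rw [pvBor_np ha hb, pvBor_pn hb ha]
  · rw [pvBor_nn ha hb, pvBor_nn hb ha, Nat.and_comm]
theorem pv_bor_zero (a : Int) : pvBor a 0 = a := by
  by_cases ha : 0 ≤ a
  · rw [pvBor_pp ha le_rfl]; simp [Int.toNat_of_nonneg ha]
  · rw [pvBor_np ha le_rfl]
    simp only [Int.toNat_zero]
    rw [show Nat.ldiff (-a-1).toNat 0 = (-a-1).toNat from by
      apply Nat.eq_of_testBit_eq; intro k; simp [Nat.testBit_ldiff]]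
    omega
theorem pv_negcomp (n : Nat) : (-(-((n:Nat):Int)-1)-1).toNat = n := by omega
theorem pv_neg_not_nonneg (n : Nat) : ¬ (0:Int) ≤ -((n:Nat):Int) - 1 := by omega
theorem pv_bor_assoc (a b c : Int) : pvBor (pvBor a b) c = pvBor a (pvBor b c) := by
  by_cases ha : 0 ≤ a <;> by_cases hb : 0 ≤ b <;> by_cases hc : 0 ≤ c
  · -- +++
    rw [pvBor_pp ha hb, pvBor_pp hb hc, pvBor_pp (Int.natCast_nonneg _) hc,
        pvBor_pp ha (Int.natCast_nonneg _)]
    simp [Nat.or_assoc]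
  · -- ++-
    rw [pvBor_pp ha hb, pvBor_pn (Int.natCast_nonneg _) hc, pvBor_pn hb hc,
        pvBor_pn ha (pv_neg_not_nonneg _)]
    simp only [Int.toNat_natCast, pv_negcomp]
    rw [pv_ldiff_ldiff_left]
  · -- +-+
    rw [pvBor_pn ha hb, pvBor_np (pv_neg_not_nonneg _) hc, pvBor_np hb hc,
        pvBor_pn ha (pv_neg_not_nonneg _)]
    simp only [Int.toNat_natCast, pv_negcomp]
    rw [pv_ldiff_right_comm]
  · -- +--
    rw [pvBor_pn ha hb, pvBor_nn (pv_neg_not_nonneg _) hc, pvBor_nn hb hc,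
        pvBor_pn ha (pv_neg_not_nonneg _)]
    simp only [Int.toNat_natCast, pv_negcomp]
    rw [pv_ldiff_land_left]
  · -- -++
    rw [pvBor_np ha hb, pvBor_np (pv_neg_not_nonneg _) hc, pvBor_pp hb hc,
        pvBor_np ha (Int.natCast_nonneg _)]
    simp only [Int.toNat_natCast, pv_negcomp]
    rw [pv_ldiff_ldiff_left, Nat.or_comm]
  · -- -+-
    rw [pvBor_np ha hb, pvBor_nn (pv_neg_not_nonneg _) hc, pvBor_pn hb hc,
        pvBor_nn ha (pv_neg_not_nonneg _)]
    simp only [Int.toNat_natCast, pv_negcomp]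
    rw [pv_ldiff_land_left, pv_land_ldiff]
  · -- --+
    rw [pvBor_nn ha hb, pvBor_np (pv_neg_not_nonneg _) hc, pvBor_np hb hc,
        pvBor_nn ha (pv_neg_not_nonneg _)]
    simp only [Int.toNat_natCast, pv_negcomp]
    rw [pv_land_ldiff]
  · -- ---
    rw [pvBor_nn ha hb, pvBor_nn (pv_neg_not_nonneg _) hc, pvBor_nn hb hc,
        pvBor_nn ha (pv_neg_not_nonneg _)]
    simp only [Int.toNat_natCast, pv_negcomp]
    rw [Nat.and_assoc]
theorem pv_bor_double (a b : Int) : pvBor (2*a) (2*b) = 2 * pvBor a b := by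
  by_cases ha : 0 ≤ a <;> by_cases hb : 0 ≤ b
  · rw [pvBor_pp ha hb, pvBor_pp (by omega) (by omega : (0:Int) ≤ 2*b),
        (by omega : (2*a).toNat = 2*a.toNat), (by omega : (2*b).toNat = 2*b.toNat), pv_two_mul_lor]
    push_cast; ring
  · rw [pvBor_pn ha hb, pvBor_pn (by omega) (by omega : ¬ (0:Int) ≤ 2*b),
        (by omega : (-(2*b)-1).toNat = 2*(-b-1).toNat+1), (by omega : (2*a).toNat = 2*a.toNat),
        pv_ldiff_odd_even]
    push_cast; ring
  · rw [pvBor_np ha hb, pvBor_np (by omega) (by omega : (0:Int) ≤ 2*b),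
        (by omega : (-(2*a)-1).toNat = 2*(-a-1).toNat+1), (by omega : (2*b).toNat = 2*b.toNat),
        pv_ldiff_odd_even]
    push_cast; ring
  · rw [pvBor_nn ha hb, pvBor_nn (by omega) (by omega : ¬ (0:Int) ≤ 2*b),
        (by omega : (-(2*a)-1).toNat = 2*(-a-1).toNat+1), (by omega : (-(2*b)-1).toNat = 2*(-b-1).toNat+1),
        pv_land_odd_odd]
    push_cast; ring
theorem pv_bor_shift (a b : Int) (k : Nat) : (pvBor a b) <<< k = pvBor (a <<< k) (b <<< k) := by
  induction k with
  | zero => simp [Int.shiftLeft_eq]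
  | succ k ih =>
    have h : ∀ x : Int, x <<< (k+1) = 2 * (x <<< k) := by
      intro x; simp [Int.shiftLeft_eq, pow_succ]; ring
    rw [h, h, h, ih, ← pv_bor_double]
-- fold algebra
def pvOfTerms (ts : List Int) : Int := ts.foldl pvBor 0
theorem pv_zero_bor' (a : Int) : pvBor 0 a = a := by
  rw [pv_bor_comm]; exact pv_bor_zero a
theorem pv_foldl_bor_out (ts : List Int) (a : Int) :
    ts.foldl pvBor a = pvBor a (pvOfTerms ts) := by
  induction ts generalizing a with
  | nil => simp [pvOfTerms, pv_bor_zero]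
  | cons x ts ih =>
    show (ts.foldl pvBor (pvBor a x)) = _
    rw [ih (pvBor a x)]
    have : pvOfTerms (x :: ts) = pvBor x (pvOfTerms ts) := by
      show (ts.foldl pvBor (pvBor 0 x)) = _
      rw [ih (pvBor 0 x), pv_zero_bor']
    rw [this, pv_bor_assoc]
theorem pv_ofTerms_cons (x : Int) (ts : List Int) :
    pvOfTerms (x :: ts) = pvBor x (pvOfTerms ts) := by
  show (ts.foldl pvBor (pvBor 0 x)) = _
  rw [pv_foldl_bor_out, pv_zero_bor']
theorem pv_ofTerms_reverse (ts : List Int) : pvOfTerms ts.reverse = pvOfTerms ts := by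
  induction ts with
  | nil => rfl
  | cons x ts ih =>
    rw [pv_ofTerms_cons, ← ih, List.reverse_cons]
    show (ts.reverse ++ [x]).foldl pvBor 0 = _
    rw [List.foldl_append, pv_foldl_bor_out]
    show pvBor (pvOfTerms ts.reverse) (pvOfTerms [x]) = _
    rw [show pvOfTerms [x] = x from by show pvBor 0 x = x; exact pv_zero_bor' x, pv_bor_comm]
-- term lists
def pvDesc : List Int → List Int
  | [] => []
  | b :: t => (b <<< t.length) :: pvDesc t
def pvAsc : Nat → List Int → List Int
  | _, [] => []
  | s, b :: t => (b <<< s) :: pvAsc (s+1) t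
theorem pv_asc_append_last (xs : List Int) (x : Int) (s : Nat) :
    pvAsc s (xs ++ [x]) = pvAsc s xs ++ [x <<< (s + xs.length)] := by
  induction xs generalizing s with
  | nil => simp [pvAsc]
  | cons y ys ih => simp [pvAsc, ih (s+1)]; ring_nf
theorem pv_desc_reverse (m : List Int) : (pvDesc m).reverse = pvAsc 0 m.reverse := by
  induction m with
  | nil => rfl
  | cons b t ih =>
    show ((b <<< t.length) :: pvDesc t).reverse = pvAsc 0 (b :: t).reverse
    rw [List.reverse_cons, ih, List.reverse_cons, pv_asc_append_last]
    simp
-- Horner characterization of B's loop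
theorem pv_shift_shift (x : Int) (k : Nat) : (x <<< (1:Nat)) <<< k = x <<< (k+1) := by
  simp [Int.shiftLeft_eq, pow_succ]; ring
theorem pv_horner (l : List Int) (r : Int) :
    l.foldl (fun result bit => PySem.Int.bor (result <<< (1 : Nat)) bit) r
      = pvBor (r <<< l.length) (pvOfTerms (pvDesc l)) := by
  induction l generalizing r with
  | nil =>
    simp only [List.foldl_nil, List.length_nil]
    rw [show r <<< (0:Nat) = r from by simp [Int.shiftLeft_eq],
        show pvOfTerms (pvDesc []) = 0 from rfl, pv_bor_zero]
  | cons b t ih =>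
    show t.foldl _ (PySem.Int.bor (r <<< (1:Nat)) b) = _
    rw [ih, pv_bor_eq, pv_bor_shift, pv_shift_shift,
        show pvDesc (b :: t) = (b <<< t.length) :: pvDesc t from rfl, pv_ofTerms_cons, pv_bor_assoc,
        show (b :: t).length = t.length + 1 from rfl]
-- A's loop characterizations
theorem pv_A1 (T : Int) (l : List Int) (s r : Int) (hT : T = s + l.length) :
    (PySem.List.enumerate l s).foldl
      (fun (result : Int) (p : Int × Int) => PySem.Int.bor result (p.2 <<< (T - p.1 - 1).toNat)) r
      = (pvDesc l).foldl pvBor r := by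
  induction l generalizing s r with
  | nil => rfl
  | cons b t ih =>
    rw [PySem.List.enumerate_cons]
    show (PySem.List.enumerate t (s+1)).foldl _ (PySem.Int.bor r (b <<< (T - s - 1).toNat)) = _
    rw [show (T - s - 1).toNat = t.length from by simp [hT],
        ih (s+1) _ (by simp [hT]; ring), pv_bor_eq]
    rfl
theorem pv_A2 (l : List Int) (s : Nat) (r : Int) :
    (PySem.List.enumerate l (s:Int)).foldl
      (fun (result : Int) (p : Int × Int) => PySem.Int.bor result (p.2 <<< p.1.toNat)) r
      = (pvAsc s l).foldl pvBor r := by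
  induction l generalizing s r with
  | nil => rfl
  | cons b t ih =>
    rw [PySem.List.enumerate_cons]
    show (PySem.List.enumerate t ((s:Int)+1)).foldl _ (PySem.Int.bor r (b <<< ((s:Int)).toNat)) = _
    rw [show ((s:Int)).toNat = s from Int.toNat_natCast s,
        show ((s:Int)+1) = ((s+1:Nat):Int) from by push_cast; ring, ih (s+1), pv_bor_eq]
    rfl

-- A's two modes as OR-term folds
theorem pv_A_fwd (l : List Int) : encodebits_py l false = pvOfTerms (pvDesc l) := by
  show (PySem.List.enumerate l 0).foldl
      (fun (result : Int) (p : Int × Int) =>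
        PySem.Int.bor result (p.2 <<< (((l.length : Int)) - p.1 - 1).toNat)) 0
    = pvOfTerms (pvDesc l)
  rw [pv_A1 (l.length : Int) l 0 0 (by ring)]
  rfl
theorem pv_A_rev (l : List Int) : encodebits_py l true = pvOfTerms (pvDesc l.reverse) := by
  have h2 := pv_A2 l 0 0
  simp only [Nat.cast_zero] at h2
  have h3 : encodebits_py l true = (pvAsc 0 l).foldl pvBor 0 := by
    rw [← h2]; rfl
  rw [h3, show (pvAsc 0 l).foldl pvBor 0 = pvOfTerms (pvAsc 0 l) from rfl,
      show pvAsc 0 l = (pvDesc l.reverse).reverse from by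
        rw [pv_desc_reverse l.reverse, List.reverse_reverse],
      pv_ofTerms_reverse]

-- ===== VERDICT (by name: the statement is the Claim_ definition above) =====
theorem encodebits_py_spec : Claim_equal_encodebits_py := by
  intro bits reversed_ _
  unfold Spec_encodebits_py encodebits_py_alt
  cases reversed_ with
  | false =>
      simp only [Bool.false_eq_true, if_false]
      rw [pv_horner, pv_A_fwd, show ((0:Int) <<< bits.length) = 0 by simp [Int.shiftLeft_eq], pv_zero_bor']
  | true =>
      simp only [if_true]
      rw [pv_horner, pv_A_rev, show ((0:Int) <<< bits.reverse.length) = 0 by simp [Int.shiftLeft_eq], pv_zero_bor']
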